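-- pv_equiv track=rewrite | github.com/renatocraf/Lab_CES22 | lista1/exercicio4.py | sum_list
-- ===== SOURCE A (Python) =====
-- def sum_list(lista):
--     par = False
--     cont = 0
--     sum = 0
--     # preferi utilizar o while para nao ter que usar o 'break'
--     # quando encontrasse o par
--     while (cont < len(lista) and par == False):
--         if(lista[cont]%2 ==0):
--             par = True
--         else:
--             sum = sum + lista[cont]
--         cont = cont+1
--
--     return (sum)
-- ===== SOURCE B (Python) =====
-- def sum_list(lista):
--     # Right-to-left pass: whenever an even element is seen, the running total
--     # is reset to 0, so any elements after (to the right of) the first even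
--     # value are discarded; the final total is the sum of the leading odd run.
--     acc = 0
--     for x in reversed(lista):
--         acc = 0 if x % 2 == 0 else acc + x
--     return acc
-- ===== Notes on version B (the rewrite author's own statement) =====
-- stated objective: alternative
-- what changed: Replaced A's forward flagged while-loop with a single right-to-left fold that resets the accumulator to 0 at every even element, so the elements beyond the first even value are discarded without a stop flag.
import Mathlib
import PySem

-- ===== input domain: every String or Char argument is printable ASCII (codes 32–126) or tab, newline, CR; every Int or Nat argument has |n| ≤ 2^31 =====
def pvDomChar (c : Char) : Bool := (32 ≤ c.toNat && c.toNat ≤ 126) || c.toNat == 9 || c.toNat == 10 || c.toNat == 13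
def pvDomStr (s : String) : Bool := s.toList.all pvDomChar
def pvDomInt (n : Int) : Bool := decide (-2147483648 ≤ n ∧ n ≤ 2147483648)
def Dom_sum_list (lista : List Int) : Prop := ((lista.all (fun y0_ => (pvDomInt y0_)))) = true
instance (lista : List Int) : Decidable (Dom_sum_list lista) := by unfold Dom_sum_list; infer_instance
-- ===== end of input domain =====

-- B replaces A's forward flagged while-loop by a right-to-left fold that resets to 0 at each even element (alternative decomposition, same cost).

-- ===== PORT A =====
-- A's while-loop: stops at the first even element; transcribed as recursion over the remaining suffix with the running sum
def sum_list_go : List Int → Int → Int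
  | [], s => s
  | x :: xs, s => if x % 2 == 0 then s else sum_list_go xs (s + x)

def sum_list (lista : List Int) : Int := sum_list_go lista 0

-- ===== PORT B =====
-- B: loop over reversed(lista), acc = 0 if x % 2 == 0 else acc + x
def sum_list_alt (lista : List Int) : Int :=
  lista.reverse.foldl (fun acc x => if x % 2 == 0 then 0 else acc + x) 0

-- ===== PRECONDITION & SPEC =====
def Spec_sum_list (lista : List Int) (out : Int) : Prop := out = sum_list_alt lista
instance (lista : List Int) (out : Int) : Decidable (Spec_sum_list lista out) := by unfold Spec_sum_list; infer_instance

-- ===== CLAIM (what is proved, stated in full; the proofs are below) =====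
def Claim_equal_sum_list : Prop := ∀ (lista : List Int), Dom_sum_list lista → Spec_sum_list lista (sum_list lista)

-- ===== LEMMAS AND PROOFS =====
theorem alt_eq_foldr (lista : List Int) :
    sum_list_alt lista = lista.foldr (fun x acc => if x % 2 == 0 then 0 else acc + x) 0 := by
  simp [sum_list_alt, List.foldl_reverse]

theorem go_eq_add_foldr (l : List Int) :
    ∀ s : Int, sum_list_go l s = s + l.foldr (fun x acc => if x % 2 == 0 then 0 else acc + x) 0 := by
  induction l with
  | nil => intro s; simp [sum_list_go]
  | cons x xs ih =>
    intro s
    by_cases h : x % 2 = 0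
    · simp [sum_list_go, h]
    · have h2 : ¬ (2:Int) ∣ x := by omega
      simp [sum_list_go, h, h2, ih]
      ring

-- ===== VERDICT (by name: the statement is the Claim_ definition above) =====
theorem sum_list_spec : Claim_equal_sum_list := by
  intro lista _
  unfold Spec_sum_list sum_list
  rw [alt_eq_foldr]
  simpa using go_eq_add_foldr lista 0
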